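-- pv_equiv track=rewrite | github.com/omkararade/Book-Creation | app.py | build_research_blob
-- ===== SOURCE A (Python) =====
-- def build_research_blob(link_text_pairs, max_total_chars=30000):
--     """Create research content from fetched pages"""
--     parts = []
--     total_chars = 0
--
--     for link, text in link_text_pairs:
--         if not text or "Failed to fetch" in text or "No content extracted" in text:
--             continue
--
--         snippet = text[:2000]
--         part = f"Source: {link}\n{snippet}\n---\n"
--
--         if total_chars + len(part) > max_total_chars:
--             break
--
--         parts.append(part)
--         total_chars += len(part)
--
--     return '\n'.join(parts) if parts else "No research content available"
-- ===== SOURCE B (Python) =====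
-- def build_research_blob(link_text_pairs, max_total_chars=30000):
--     """Create research content from fetched pages (build, cumulative-cut, join)."""
--     parts = [f"Source: {link}\n{text[:2000]}\n---\n"
--              for link, text in link_text_pairs
--              if text and "Failed to fetch" not in text
--              and "No content extracted" not in text]
--     totals = []
--     run = 0
--     for p in parts:
--         run += len(p)
--         totals.append(run)
--     k = 0
--     while k < len(parts) and totals[k] <= max_total_chars:
--         k += 1
--     return '\n'.join(parts[:k]) if k else "No research content available"
-- ===== Notes on version B (the rewrite author's own statement) =====
-- stated objective: alternative
-- what changed: Replaced A's single fused loop that filters, formats, accumulates a running total and breaks, by a three-stage pipeline: build the full filtered/formatted parts list, compute cumulative lengths, cut the prefix whose running total stays within the budget, then join.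
import Mathlib
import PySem

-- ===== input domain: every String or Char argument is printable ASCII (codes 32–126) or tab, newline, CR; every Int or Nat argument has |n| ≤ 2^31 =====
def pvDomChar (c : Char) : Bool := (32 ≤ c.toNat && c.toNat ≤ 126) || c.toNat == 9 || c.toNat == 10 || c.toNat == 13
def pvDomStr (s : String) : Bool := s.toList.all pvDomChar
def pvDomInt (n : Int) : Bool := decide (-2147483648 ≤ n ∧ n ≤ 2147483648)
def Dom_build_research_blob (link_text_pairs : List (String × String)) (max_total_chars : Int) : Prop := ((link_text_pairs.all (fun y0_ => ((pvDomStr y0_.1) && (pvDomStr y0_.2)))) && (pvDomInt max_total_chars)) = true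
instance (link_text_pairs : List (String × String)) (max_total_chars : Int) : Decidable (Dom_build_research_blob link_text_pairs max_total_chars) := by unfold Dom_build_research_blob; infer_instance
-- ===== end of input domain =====

-- B replaces A's fused accumulate-and-break loop by a build / cumulative-cut / join pipeline (objective: alternative decomposition, same cost).


-- ===== PORT A =====
-- 'not text or "Failed to fetch" in text or "No content extracted" in text'
def pvSkipA (text : String) : Bool :=
  text == "" || PySem.Str.isIn "Failed to fetch" text || PySem.Str.isIn "No content extracted" text

-- f"Source: {link}\n{text[:2000]}\n---\n"
def pvPart (link text : String) : String :=
  "Source: " ++ link ++ "\n" ++ PySem.Str.slice text none (some 2000) ++ "\n---\n"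

-- the for-loop with break, state = (parts, total_chars)
def pvGoA (max_total_chars : Int) : List (String × String) → List String → Int → List String
  | [], parts, _ => parts
  | (link, text) :: rest, parts, total =>
    if pvSkipA text then pvGoA max_total_chars rest parts total
    else
      let part := pvPart link text
      if total + (PySem.Str.len part : Int) > max_total_chars then parts
      else pvGoA max_total_chars rest (parts ++ [part]) (total + (PySem.Str.len part : Int))

def build_research_blob (link_text_pairs : List (String × String)) (max_total_chars : Int) : String :=
  let parts := pvGoA max_total_chars link_text_pairs [] 0
  if parts = [] then "No research content available" else PySem.Str.join "\n" parts

-- ===== PORT B =====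
-- the list comprehension of Source B: formatted parts of the pairs that pass the filter
def pvKeepB (text : String) : Bool :=
  text != "" && !PySem.Str.isIn "Failed to fetch" text && !PySem.Str.isIn "No content extracted" text

def pvPartsB (link_text_pairs : List (String × String)) : List String :=
  link_text_pairs.filterMap (fun p => if pvKeepB p.2 then some (pvPart p.1 p.2) else none)

-- the running-total loop: totals[i] = len(parts[0]) + … + len(parts[i])
def pvTotalsB : List String → Int → List Int
  | [], _ => []
  | p :: ps, run => (run + (PySem.Str.len p : Int)) :: pvTotalsB ps (run + (PySem.Str.len p : Int))

-- the while loop: number of leading totals ≤ max_total_chars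
def pvCountB (max_total_chars : Int) : List Int → Nat
  | [] => 0
  | t :: ts => if t ≤ max_total_chars then pvCountB max_total_chars ts + 1 else 0

def build_research_blob_alt (link_text_pairs : List (String × String)) (max_total_chars : Int) : String :=
  let parts := pvPartsB link_text_pairs
  let totals := pvTotalsB parts 0
  let k := pvCountB max_total_chars totals
  if k = 0 then "No research content available" else PySem.Str.join "\n" (parts.take k)

-- ===== PRECONDITION & SPEC =====
def Spec_build_research_blob (link_text_pairs : List (String × String)) (max_total_chars : Int) (out : String) : Prop := out = build_research_blob_alt link_text_pairs max_total_chars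
instance (link_text_pairs : List (String × String)) (max_total_chars : Int) (out : String) : Decidable (Spec_build_research_blob link_text_pairs max_total_chars out) := by unfold Spec_build_research_blob; infer_instance

-- ===== CLAIM (what is proved, stated in full; the proofs are below) =====
def Claim_equal_build_research_blob : Prop := ∀ (link_text_pairs : List (String × String)) (max_total_chars : Int), Dom_build_research_blob link_text_pairs max_total_chars → Spec_build_research_blob link_text_pairs max_total_chars (build_research_blob link_text_pairs max_total_chars)

-- ===== LEMMAS AND PROOFS =====

-- B's filter is the negation of A's skip test
lemma pvKeepB_eq_not_skip (text : String) : pvKeepB text = !pvSkipA text := by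
  simp [pvKeepB, pvSkipA, Bool.not_or, bne, Bool.and_assoc]

lemma pvPartsB_cons_skip (link text : String) (tl : List (String × String))
    (h : pvKeepB text = false) : pvPartsB ((link, text) :: tl) = pvPartsB tl := by
  simp [pvPartsB, h]

lemma pvPartsB_cons_keep (link text : String) (tl : List (String × String))
    (h : pvKeepB text = true) : pvPartsB ((link, text) :: tl) = pvPart link text :: pvPartsB tl := by
  simp [pvPartsB, h]

-- A's loop produces exactly acc ++ the k-prefix of B's filtered parts, k read off the running totals
lemma pvGoA_eq (max : Int) : ∀ (l : List (String × String)) (acc : List String) (total : Int),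
    pvGoA max l acc total =
      acc ++ (pvPartsB l).take (pvCountB max (pvTotalsB (pvPartsB l) total)) := by
  intro l
  induction l with
  | nil => intro acc total; simp [pvGoA, pvPartsB, pvTotalsB, pvCountB]
  | cons hd tl ih =>
    intro acc total
    obtain ⟨link, text⟩ := hd
    by_cases hk : pvKeepB text = true
    · have hs : pvSkipA text = false := by
        rw [pvKeepB_eq_not_skip] at hk
        cases h : pvSkipA text
        · rfl
        · rw [h] at hk; exact absurd hk (by decide)
      rw [pvPartsB_cons_keep link text tl hk]
      simp only [pvGoA, hs, Bool.false_eq_true, if_false, pvTotalsB, pvCountB]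
      by_cases hover : max < total + (PySem.Str.len (pvPart link text) : Int)
      · have h2 : ¬ (total + (PySem.Str.len (pvPart link text) : Int) ≤ max) := by omega
        rw [if_pos hover, if_neg h2]
        simp
      · have h2 : total + (PySem.Str.len (pvPart link text) : Int) ≤ max := by omega
        rw [if_neg hover, if_pos h2, ih]
        simp [List.take_succ_cons]
    · have hkf : pvKeepB text = false := by
        cases h : pvKeepB text
        · rfl
        · exact absurd h hk
      have hs : pvSkipA text = true := by
        rw [pvKeepB_eq_not_skip] at hkf
        cases h : pvSkipA text
        · rw [h] at hkf; exact absurd hkf (by decide)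
        · rfl
      rw [pvPartsB_cons_skip link text tl hkf]
      simp only [pvGoA, hs, if_true]
      exact ih acc total

lemma pvTake_count_eq_nil_iff (max : Int) (ps : List String) (t : Int) :
    ps.take (pvCountB max (pvTotalsB ps t)) = [] ↔ pvCountB max (pvTotalsB ps t) = 0 := by
  cases ps with
  | nil => simp [pvTotalsB, pvCountB]
  | cons p ps =>
    simp only [pvTotalsB, pvCountB]
    by_cases h : t + (PySem.Str.len p : Int) ≤ max
    · rw [if_pos h]; simp
    · rw [if_neg h]; simp

-- ===== VERDICT (by name: the statement is the Claim_ definition above) =====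
theorem build_research_blob_spec : Claim_equal_build_research_blob := by
  intro l max _
  unfold Spec_build_research_blob build_research_blob build_research_blob_alt
  rw [pvGoA_eq max l [] 0]
  simp only [List.nil_append]
  by_cases h0 : pvCountB max (pvTotalsB (pvPartsB l) 0) = 0
  · have hnil : (pvPartsB l).take (pvCountB max (pvTotalsB (pvPartsB l) 0)) = [] :=
      (pvTake_count_eq_nil_iff max (pvPartsB l) 0).2 h0
    rw [if_pos hnil, if_pos h0]
  · have hnn : (pvPartsB l).take (pvCountB max (pvTotalsB (pvPartsB l) 0)) ≠ [] :=
      fun hnil => h0 ((pvTake_count_eq_nil_iff max (pvPartsB l) 0).1 hnil)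
    rw [if_neg hnn, if_neg h0]
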